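-- pv_equiv track=rewrite | github.com/YannCmr/Ia41_project | 02_Code/ai/MiniMaxMoyen.py | check_squares
-- ===== SOURCE A (Python) =====
-- def check_squares(board, player):
--     """
--     Checks if there is a 2x2 square of the player's pieces on the board.
--
--     Args:
--         board (list): The game board as a 2D list.
--         player (str): The player's symbol (e.g., 'B' or 'W').
--
--     Returns:
--         bool: True if a 2x2 square of the player's pieces exists, False otherwise.
--     """
--     for row in range(len(board) - 1):  # Iterate over possible starting rows
--         for col in range(len(board[row]) - 1):  # Iterate over possible starting columns
--             if (
--                 board[row][col] == player and
--                 board[row + 1][col] == player and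
--                 board[row][col + 1] == player and
--                 board[row + 1][col + 1] == player
--             ):
--                 return True
--     return False
-- ===== SOURCE B (Python) =====
-- def check_squares(board, player):
--     """
--     Checks if there is a 2x2 square of the player's pieces on the board.
--
--     Streak-scan formulation: fuse each pair of adjacent rows into a stream of
--     column pairs and count consecutive columns where both cells belong to the
--     player; a run of length 2 is exactly a 2x2 square.
--     """
--     for upper, lower in zip(board, board[1:]):
--         run = 0
--         for a, b in zip(upper, lower):
--             run = run + 1 if a == player and b == player else 0
--             if run == 2:
--                 return True
--     return False
-- ===== Notes on version B (the rewrite author's own statement) =====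
-- stated objective: alternative
-- what changed: B replaces A's per-cell 2x2 window test with a run-length streak scan: each pair of adjacent rows is zipped into one stream of column pairs and a counter of consecutive both-player columns is maintained, returning True when a run reaches 2; no neighbour indexing, so B returns a bool on ragged boards where A can raise IndexError.
-- outside the precondition, e.g. on check_squares([['B', 'B'], ['B']], 'B'): A raises IndexError, B returns False; on check_squares([['B', 'B', 'X'], ['B', 'B']], 'B'): A returns True, B returns True
import Mathlib
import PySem

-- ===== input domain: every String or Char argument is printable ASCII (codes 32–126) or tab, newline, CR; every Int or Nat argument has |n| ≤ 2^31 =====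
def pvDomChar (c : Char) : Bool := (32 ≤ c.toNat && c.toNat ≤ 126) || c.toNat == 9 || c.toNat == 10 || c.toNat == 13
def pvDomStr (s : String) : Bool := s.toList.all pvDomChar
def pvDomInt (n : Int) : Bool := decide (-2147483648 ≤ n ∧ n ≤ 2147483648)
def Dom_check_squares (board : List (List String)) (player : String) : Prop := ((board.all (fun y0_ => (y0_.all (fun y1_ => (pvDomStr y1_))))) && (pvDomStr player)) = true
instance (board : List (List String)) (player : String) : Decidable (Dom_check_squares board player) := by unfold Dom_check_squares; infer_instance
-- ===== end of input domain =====

-- B detects a 2x2 square by a run-length streak scan over zipped adjacent rows instead of A's per-cell window test; same cost, no neighbour indexing.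

-- ===== PORT A =====
-- board[r][c] as A reads it; out-of-range reads (which make Python A raise) yield "" here, excluded by Pre_.
def pvCellA (board : List (List String)) (r c : Int) : String :=
  PySem.List.pyGetD (PySem.List.pyGetD board r []) c ""

def check_squares (board : List (List String)) (player : String) : Bool :=
  (PySem.List.pyRange 0 ((board.length : Int) - 1) 1).any (fun row =>
    (PySem.List.pyRange 0 (((PySem.List.pyGetD board row []).length : Int) - 1) 1).any (fun col =>
      pvCellA board row col == player &&
      pvCellA board (row + 1) col == player &&
      pvCellA board row (col + 1) == player &&
      pvCellA board (row + 1) (col + 1) == player))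

-- ===== PORT B =====
-- inner loop of Source B: run-length counter over the stream of (upper, lower) column pairs
def pvRunScan (player : String) : List (String × String) → Nat → Bool
  | [], _ => false
  | ab :: rest, run =>
    if ab.1 == player && ab.2 == player then
      if run + 1 == 2 then true else pvRunScan player rest (run + 1)
    else pvRunScan player rest 0

def check_squares_alt (board : List (List String)) (player : String) : Bool :=
  (board.zip board.tail).any (fun ul => pvRunScan player (ul.1.zip ul.2) 0)

-- ===== PRECONDITION & SPEC =====
-- Pre_ excludes ragged boards on which a player's piece at (r, c) with c+1 < len(board[r]) and r+1 < len(board)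
-- sits above a row of length < c+2: there A's short-circuited window check reads board[r+1][c] / board[r+1][c+1]
-- and can raise IndexError (it returns only if an earlier window already formed a square).
def Pre_check_squares (board : List (List String)) (player : String) : Prop :=
  ∀ r : Nat, r < board.length → ∀ c : Nat, c < (board.getD r []).length →
    (r + 1 < board.length ∧ c + 1 < (board.getD r []).length ∧ (board.getD r []).getD c "" = player) →
      c + 1 < (board.getD (r + 1) []).length
instance (board : List (List String)) (player : String) : Decidable (Pre_check_squares board player) := by
  unfold Pre_check_squares; infer_instance

def pvWitness_check_squares : List (List String) × String :=
  ([["B", "B"], ["B", "W"]], "B")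

def Spec_check_squares (board : List (List String)) (player : String) (out : Bool) : Prop := out = check_squares_alt board player
instance (board : List (List String)) (player : String) (out : Bool) : Decidable (Spec_check_squares board player out) := by unfold Spec_check_squares; infer_instance

-- ===== CLAIM (what is proved, stated in full; the proofs are below) =====
def Claim_equal_check_squares : Prop := ∀ (board : List (List String)) (player : String), Dom_check_squares board player → Pre_check_squares board player → Spec_check_squares board player (check_squares board player)

-- ===== LEMMAS AND PROOFS =====

-- the common characterisation: a fully in-range 2x2 square of the player's pieces exists
def pvSquare (board : List (List String)) (player : String) : Prop :=
  ∃ r c : Nat, r + 1 < board.length ∧ c + 1 < (board.getD r []).length ∧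
    c + 1 < (board.getD (r + 1) []).length ∧
    (board.getD r []).getD c "" = player ∧ (board.getD (r + 1) []).getD c "" = player ∧
    (board.getD r []).getD (c + 1) "" = player ∧ (board.getD (r + 1) []).getD (c + 1) "" = player

-- a "good" stream element: both cells are the player's
def pvGood (player : String) (ab : String × String) : Prop := ab.1 = player ∧ ab.2 = player

-- run-length scan characterisation, both entry states at once
theorem pvRunScan_spec (player : String) (l : List (String × String)) :
    (pvRunScan player l 0 = true ↔
       ∃ i : Nat, ∃ h : i + 1 < l.length, pvGood player l[i] ∧ pvGood player l[i + 1]) ∧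
    (pvRunScan player l 1 = true ↔
       ((∃ h : 0 < l.length, pvGood player l[0]) ∨
        ∃ i : Nat, ∃ h : i + 1 < l.length, pvGood player l[i] ∧ pvGood player l[i + 1])) := by
  induction l with
  | nil => simp [pvRunScan]
  | cons ab rest ih =>
    obtain ⟨ih0, ih1⟩ := ih
    by_cases hg : pvGood player ab
    · have hgb : (ab.1 == player && ab.2 == player) = true := by
        simp [pvGood] at hg; simp [hg.1, hg.2]
      constructor
      · rw [show pvRunScan player (ab :: rest) 0 = pvRunScan player rest 1 by
          simp [pvRunScan, hgb]]
        rw [ih1]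
        constructor
        · rintro (⟨h0, hgd⟩ | ⟨i, hi, h1, h2⟩)
          · exact ⟨0, by simpa using Nat.succ_lt_succ h0, hg, hgd⟩
          · exact ⟨i + 1, by simpa using Nat.succ_lt_succ hi, h1, h2⟩
        · rintro ⟨i, hi, h1, h2⟩
          cases i with
          | zero => exact Or.inl ⟨by simpa using Nat.lt_of_succ_lt_succ hi, h2⟩
          | succ j =>
            exact Or.inr ⟨j, by simpa using Nat.lt_of_succ_lt_succ hi, h1, h2⟩
      · rw [show pvRunScan player (ab :: rest) 1 = true by simp [pvRunScan, hgb]]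
        simp only [true_iff]
        exact Or.inl ⟨by simp, hg⟩
    · have hgb : (ab.1 == player && ab.2 == player) = false := by
        simp [pvGood] at hg
        by_cases h1 : ab.1 = player
        · simp [h1, hg h1]
        · simp [h1]
      have step : ∀ run, pvRunScan player (ab :: rest) run = pvRunScan player rest 0 := by
        intro run; simp [pvRunScan, hgb]
      have shift : (∃ i : Nat, ∃ h : i + 1 < rest.length,
            pvGood player rest[i] ∧ pvGood player rest[i + 1]) ↔
          ∃ i : Nat, ∃ h : i + 1 < (ab :: rest).length,
            pvGood player (ab :: rest)[i] ∧ pvGood player (ab :: rest)[i + 1] := by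
        constructor
        · rintro ⟨i, hi, h1, h2⟩
          exact ⟨i + 1, by simpa using Nat.succ_lt_succ hi, h1, h2⟩
        · rintro ⟨i, hi, h1, h2⟩
          cases i with
          | zero => exact absurd h1 (by simpa using hg)
          | succ j =>
            exact ⟨j, by simpa using Nat.lt_of_succ_lt_succ hi, h1, h2⟩
      constructor
      · rw [step 0, ih0]; exact shift
      · rw [step 1, ih0]
        rw [shift]
        constructor
        · exact Or.inr
        · rintro (⟨h0, hgd⟩ | h)
          · exact absurd hgd (by simpa using hg)
          · exact h

theorem check_squares_alt_iff (board : List (List String)) (player : String) :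
    check_squares_alt board player = true ↔ pvSquare board player := by
  unfold check_squares_alt pvSquare
  rw [List.any_eq_true]
  constructor
  · rintro ⟨ul, hmem, hscan⟩
    obtain ⟨r, hr, hul⟩ := List.mem_iff_getElem.mp hmem
    have hr' : r + 1 < board.length := by
      have := hr; simp [List.length_zip] at this; omega
    have hul' : ul = (board[r], board[r+1]) := by
      rw [← hul]; rw [List.getElem_zip]
      congr 1
      rw [List.getElem_tail]
    obtain ⟨i, hi, h1, h2⟩ := ((pvRunScan_spec player (ul.1.zip ul.2)).1).mp hscan
    subst hul'
    simp only at hi h1 h2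
    have hiu : i + 1 < board[r].length ∧ i + 1 < board[r+1].length := by
      simp [List.length_zip] at hi; omega
    rw [List.getElem_zip] at h1 h2
    obtain ⟨hg1a, hg1b⟩ := h1
    obtain ⟨hg2a, hg2b⟩ := h2
    simp only [pvGood] at hg1a hg1b hg2a hg2b
    have hrow : board.getD r [] = board[r] := by
      simp [List.getD, List.getElem?_eq_getElem (Nat.lt_of_succ_lt hr')]
    have hrow' : board.getD (r + 1) [] = board[r + 1] := by
      simp [List.getD, List.getElem?_eq_getElem hr']
    refine ⟨r, i, hr', by rw [hrow]; exact hiu.1, by rw [hrow']; exact hiu.2,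
      by rw [hrow]; simpa [List.getD, List.getElem?_eq_getElem (Nat.lt_of_succ_lt hiu.1)] using hg1a,
      by rw [hrow']; simpa [List.getD, List.getElem?_eq_getElem (Nat.lt_of_succ_lt hiu.2)] using hg1b,
      by rw [hrow]; simpa [List.getD, List.getElem?_eq_getElem hiu.1] using hg2a,
      by rw [hrow']; simpa [List.getD, List.getElem?_eq_getElem hiu.2] using hg2b⟩
  · rintro ⟨r, c, hr, hc, hc', h00, h10, h01, h11⟩
    have hrb : r < board.length := Nat.lt_of_succ_lt hr
    have hrow : board.getD r [] = board[r] := by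
      simp [List.getD, List.getElem?_eq_getElem hrb]
    have hrow' : board.getD (r+1) [] = board[r+1] := by
      simp [List.getD, List.getElem?_eq_getElem hr]
    rw [hrow] at hc h00 h01
    rw [hrow'] at hc' h10 h11
    refine ⟨(board[r], board[r+1]), ?_, ?_⟩
    · apply List.mem_iff_getElem.mpr
      refine ⟨r, by simp [List.length_zip]; omega, ?_⟩
      rw [List.getElem_zip]; congr 1; rw [List.getElem_tail]
    · apply ((pvRunScan_spec player _).1).mpr
      have hiz : c + 1 < (board[r].zip board[r+1]).length := by
        simp [List.length_zip]; omega
      refine ⟨c, hiz, ?_, ?_⟩ <;> rw [List.getElem_zip] <;> constructor <;>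
        simp_all [pvGood, List.getD, List.getElem?_eq_getElem hc,
          List.getElem?_eq_getElem hc', List.getElem?_eq_getElem (Nat.lt_of_succ_lt hc),
          List.getElem?_eq_getElem (Nat.lt_of_succ_lt hc')]

theorem pvCellA_eq (board : List (List String)) (r c : Nat) :
    pvCellA board (r : Int) (c : Int) = (board.getD r []).getD c "" := by
  simp [pvCellA, PySem.List.pyGetD_natCast, List.getD]

theorem check_squares_iff (board : List (List String)) (player : String)
    (hpre : Pre_check_squares board player) :
    check_squares board player = true ↔ pvSquare board player := by
  unfold check_squares pvSquare
  rw [List.any_eq_true]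
  constructor
  · rintro ⟨row, hrow, h⟩
    rw [PySem.List.mem_pyRange_one] at hrow
    rw [List.any_eq_true] at h
    obtain ⟨col, hcol, h⟩ := h
    rw [PySem.List.mem_pyRange_one] at hcol
    obtain ⟨r, rfl⟩ := Int.eq_ofNat_of_zero_le hrow.1
    have hrowlen : PySem.List.pyGetD board (r : Int) [] = board.getD r [] := by
      simp [PySem.List.pyGetD_natCast, List.getD]
    rw [hrowlen] at hcol
    obtain ⟨c, rfl⟩ := Int.eq_ofNat_of_zero_le hcol.1
    simp only [Bool.and_eq_true, beq_iff_eq] at h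
    have hr : r + 1 < board.length := by omega
    have hc : c + 1 < (board.getD r []).length := by omega
    obtain ⟨⟨⟨h00, h10⟩, h01⟩, h11⟩ := h
    rw [pvCellA_eq] at h00
    have hc' : c + 1 < (board.getD (r + 1) []).length :=
      hpre r (by omega) c (by omega) ⟨hr, hc, h00⟩
    refine ⟨r, c, hr, hc, hc', h00, ?_, ?_, ?_⟩
    · rw [show ((r : Int) + 1) = ((r + 1 : Nat) : Int) by push_cast; ring, pvCellA_eq] at h10
      exact h10
    · rw [show ((c : Int) + 1) = ((c + 1 : Nat) : Int) by push_cast; ring, pvCellA_eq] at h01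
      exact h01
    · rw [show ((r : Int) + 1) = ((r + 1 : Nat) : Int) by push_cast; ring,
        show ((c : Int) + 1) = ((c + 1 : Nat) : Int) by push_cast; ring, pvCellA_eq] at h11
      exact h11
  · rintro ⟨r, c, hr, hc, hc', h00, h10, h01, h11⟩
    refine ⟨(r : Int), ?_, ?_⟩
    · rw [PySem.List.mem_pyRange_one]; constructor <;> [positivity; omega]
    · rw [List.any_eq_true]
      refine ⟨(c : Int), ?_, ?_⟩
      · rw [PySem.List.mem_pyRange_one]
        have : PySem.List.pyGetD board (r : Int) [] = board.getD r [] := by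
          simp [PySem.List.pyGetD_natCast, List.getD]
        rw [this]
        constructor <;> [positivity; omega]
      · simp only [Bool.and_eq_true, beq_iff_eq]
        rw [show ((r : Int) + 1) = ((r + 1 : Nat) : Int) by push_cast; ring,
          show ((c : Int) + 1) = ((c + 1 : Nat) : Int) by push_cast; ring]
        rw [pvCellA_eq, pvCellA_eq, pvCellA_eq, pvCellA_eq]
        exact ⟨⟨⟨h00, h10⟩, h01⟩, h11⟩

-- ===== VERDICT (by name: the statement is the Claim_ definition above) =====
theorem check_squares_spec : Claim_equal_check_squares := by
  intro board player _ hpre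
  unfold Spec_check_squares
  have ha := check_squares_iff board player hpre
  have hb := check_squares_alt_iff board player
  cases h : check_squares_alt board player
  · cases h' : check_squares board player
    · rfl
    · exact absurd (hb.mpr (ha.mp h')) (by simp [h])
  · cases h' : check_squares board player
    · exact absurd (ha.mpr (hb.mp h)) (by simp [h'])
    · rfl
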